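-- pv_equiv track=rewrite | github.com/thruster95/etf_backtesting | kiwoom_data.py | _extract_first_list
-- ===== SOURCE A (Python) =====
-- def _extract_first_list(data: dict) -> list:
--     candidates = []
--     for k, v in data.items():
--         if isinstance(v, list) and v and isinstance(v[0], dict):
--             candidates.append((k, v))
--     if candidates:
--         candidates.sort(key=lambda x: len(x[1]), reverse=True)
--         return candidates[0][1]
--     return []
-- ===== SOURCE B (Python) =====
-- def _extract_first_list(data: dict) -> list:
--     best = None
--     for v in data.values():
--         if isinstance(v, list) and v and isinstance(v[0], dict) and (best is None or len(v) > len(best)):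
--             best = v
--     return best if best is not None else []
-- ===== Notes on version B (the rewrite author's own statement) =====
-- stated objective: simpler
-- what changed: Replaces the collect-candidates-then-stable-reverse-sort pipeline with a single pass keeping the current longest qualifying value (strict '>' reproduces the stable sort's first-wins tie-break).
import Mathlib
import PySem

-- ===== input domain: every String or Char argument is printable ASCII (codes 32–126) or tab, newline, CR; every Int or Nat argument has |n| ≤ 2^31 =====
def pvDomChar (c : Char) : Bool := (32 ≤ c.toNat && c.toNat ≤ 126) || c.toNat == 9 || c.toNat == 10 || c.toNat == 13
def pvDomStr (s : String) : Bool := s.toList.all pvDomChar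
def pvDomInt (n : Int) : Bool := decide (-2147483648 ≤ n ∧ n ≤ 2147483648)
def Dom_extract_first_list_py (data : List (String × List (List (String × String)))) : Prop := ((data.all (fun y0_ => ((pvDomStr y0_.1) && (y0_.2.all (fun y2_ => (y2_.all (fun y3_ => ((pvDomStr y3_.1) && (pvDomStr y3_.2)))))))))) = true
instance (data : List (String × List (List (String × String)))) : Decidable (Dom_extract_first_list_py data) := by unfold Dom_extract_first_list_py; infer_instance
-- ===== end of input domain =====

-- B replaces the collect-then-stable-reverse-sort pipeline with a single pass keeping
-- the current longest qualifying value (strict '>' gives the same first-wins tie-break); simpler.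


-- ===== PORT A =====
-- Under the stated types every value is a list of dicts, so `isinstance(v, list)` and
-- `isinstance(v[0], dict)` are always true; the remaining truthiness test `v` is `!v.isEmpty`.
def extract_first_list_py (data : List (String × List (List (String × String)))) : List (List (String × String)) :=
  let candidates := data.foldl
    (fun acc kv => if !kv.2.isEmpty then acc ++ [kv] else acc)
    ([] : List (String × List (List (String × String))))
  -- `if candidates: candidates.sort(key=..., reverse=True); return candidates[0][1]` / `return []`
  -- (sorted of [] is [], so matching on the sorted list covers both branches exactly)
  match PySem.List.sorted candidates (fun x => x.2.length) true with
  | [] => []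
  | c :: _ => c.2

-- ===== PORT B =====
def extract_first_list_py_alt (data : List (String × List (List (String × String)))) : List (List (String × String)) :=
  let best := data.foldl
    (fun best kv =>
      if (!kv.2.isEmpty) && (match best with
                             | none => true
                             | some b => decide (b.length < kv.2.length)) then some kv.2 else best)
    (none : Option (List (List (String × String))))
  best.getD []

-- ===== PRECONDITION & SPEC =====
def Spec_extract_first_list_py (data : List (String × List (List (String × String)))) (out : List (List (String × String))) : Prop := out = extract_first_list_py_alt data
instance (data : List (String × List (List (String × String)))) (out : List (List (String × String))) : Decidable (Spec_extract_first_list_py data out) := by unfold Spec_extract_first_list_py; infer_instance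

-- ===== CLAIM (what is proved, stated in full; the proofs are below) =====
def Claim_equal_extract_first_list_py : Prop := ∀ (data : List (String × List (List (String × String)))), Dom_extract_first_list_py data → Spec_extract_first_list_py data (extract_first_list_py data)

-- ===== LEMMAS AND PROOFS =====
-- proof-only helpers: the reverse-order comparator and the two scan steps, named so that
-- rewriting works across lemmas (the ports' lambdas are definitionally equal to these)

def pvBefore (a b : String × List (List (String × String))) : Bool :=
  decide (b.2.length < a.2.length)

def pvScanStep (o : Option (String × List (List (String × String))))
    (x : String × List (List (String × String))) :
    Option (String × List (List (String × String))) :=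
  match o with
  | none => some x
  | some y => if pvBefore x y then some x else some y

def pvBStep (best : Option (List (List (String × String))))
    (kv : String × List (List (String × String))) :
    Option (List (List (String × String))) :=
  if (!kv.2.isEmpty) && (match best with
                         | none => true
                         | some b => decide (b.length < kv.2.length)) then some kv.2 else best

-- head of a (reverse-order) stable insertion step
theorem pv_insertBy_head (x : String × List (List (String × String)))
    (acc : List (String × List (List (String × String)))) :
    (PySem.List.insertBy pvBefore x acc).head? = pvScanStep acc.head? x := by
  cases acc with
  | nil => simp [PySem.List.insertBy, pvScanStep]
  | cons y ys =>
    simp only [PySem.List.insertBy, List.head?_cons, pvScanStep]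
    split <;> simp_all

-- head of the insertion-sort foldl = a first-wins maximum scan
theorem pv_foldl_insert_head (xs acc : List (String × List (List (String × String)))) :
    (xs.foldl (fun acc x => PySem.List.insertBy pvBefore x acc) acc).head? =
      xs.foldl pvScanStep acc.head? := by
  induction xs generalizing acc with
  | nil => rfl
  | cons x xs ih =>
    simp only [List.foldl_cons]
    rw [ih, pv_insertBy_head]

-- accumulating appends is filtering
theorem pv_foldl_filter (p : (String × List (List (String × String))) → Bool)
    (data : List (String × List (List (String × String))))
    (acc : List (String × List (List (String × String)))) :
    data.foldl (fun acc kv => if p kv then acc ++ [kv] else acc) acc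
      = acc ++ data.filter p := by
  induction data generalizing acc with
  | nil => simp
  | cons kv t ih =>
    simp only [List.foldl_cons, List.filter_cons]
    by_cases h : p kv = true <;> simp [h, ih]

-- the max-scan over the filtered pairs, projected to values, is B's scan over all pairs
theorem pv_scan_eq (data : List (String × List (List (String × String))))
    (o : Option (String × List (List (String × String)))) :
    ((data.filter (fun kv => !kv.2.isEmpty)).foldl pvScanStep o).map (·.2)
      = data.foldl pvBStep (o.map (·.2)) := by
  induction data generalizing o with
  | nil => rfl
  | cons kv t ih =>
    rw [List.filter_cons]
    by_cases h : (!kv.2.isEmpty) = true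
    · rw [if_pos h, List.foldl_cons, List.foldl_cons, ih]
      congr 1
      cases o with
      | none => simp [pvScanStep, pvBStep, h]
      | some y =>
        by_cases hl : y.2.length < kv.2.length <;>
          simp [pvScanStep, pvBStep, pvBefore, h, hl]
    · rw [if_neg h, List.foldl_cons, ih]
      congr 1
      simp only [Bool.not_eq_true] at h
      simp [pvBStep, h]

-- ===== VERDICT (by name: the statement is the Claim_ definition above) =====
theorem extract_first_list_py_spec : Claim_equal_extract_first_list_py := by
  intro data _
  unfold Spec_extract_first_list_py extract_first_list_py extract_first_list_py_alt
  show (match (data.foldl (fun acc kv => if !kv.2.isEmpty then acc ++ [kv] else acc)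
                 []).foldl (fun acc x => PySem.List.insertBy pvBefore x acc) [] with
        | [] => []
        | c :: _ => c.2)
      = (data.foldl pvBStep none).getD []
  rw [pv_foldl_filter, List.nil_append]
  have h := pv_foldl_insert_head (data.filter (fun kv => !kv.2.isEmpty)) []
  have h2 := pv_scan_eq data none
  simp only [List.head?_nil] at h
  cases hs : (data.filter (fun kv => !kv.2.isEmpty)).foldl
      (fun acc x => PySem.List.insertBy pvBefore x acc) [] with
  | nil =>
    rw [hs] at h
    simp only [List.head?_nil] at h
    rw [← h] at h2
    simp only [Option.map_none] at h2
    rw [← h2]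
    rfl
  | cons c t =>
    rw [hs] at h
    simp only [List.head?_cons] at h
    simp only [Option.map_none] at h2
    rw [← h] at h2
    simp only [Option.map_some] at h2
    rw [← h2]
    rfl
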